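-- pv_equiv track=rewrite | github.com/aldewereld/AventOfCode | 2019/day04/day4.py | has_decreasing
-- ===== SOURCE A (Python) =====
-- from typing import List
--
-- def has_decreasing(input: List[int], maxV: int = 0) -> bool:
--     if len(input) == 0:
--         return False
--     else:
--         head, *tail = input
--         if int(head) < maxV:
--             return True
--         else:
--             return has_decreasing(tail, max(maxV, int(head)))
-- ===== SOURCE B (Python) =====
-- from typing import List
--
-- def has_decreasing(input: List[int], maxV: int = 0) -> bool:
--     # A dip below the running max (seeded with maxV) occurs iff the
--     # sequence [maxV] + input has an adjacent decrease somewhere.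
--     xs = [maxV] + [int(x) for x in input]
--     return any(b < a for a, b in zip(xs, xs[1:]))
-- ===== Notes on version B (the rewrite author's own statement) =====
-- stated objective: idiomatic
-- what changed: Replaces the tail recursion carrying a running maximum by a single pairwise scan: the answer equals whether [maxV]+input contains an adjacent decrease, checked with any/zip and no accumulator.
import Mathlib
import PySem

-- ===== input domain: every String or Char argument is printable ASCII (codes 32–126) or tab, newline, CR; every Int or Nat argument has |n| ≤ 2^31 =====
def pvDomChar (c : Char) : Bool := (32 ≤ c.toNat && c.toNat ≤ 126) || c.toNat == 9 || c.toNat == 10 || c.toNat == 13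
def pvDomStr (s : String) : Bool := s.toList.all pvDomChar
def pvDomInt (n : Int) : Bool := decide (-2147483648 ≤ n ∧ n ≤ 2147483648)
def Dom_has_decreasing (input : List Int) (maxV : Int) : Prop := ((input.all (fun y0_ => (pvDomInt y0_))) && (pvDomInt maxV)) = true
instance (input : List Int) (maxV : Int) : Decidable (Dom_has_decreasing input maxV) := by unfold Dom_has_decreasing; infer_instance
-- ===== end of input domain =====

-- B replaces the running-max tail recursion by an adjacent-pairs scan of [maxV] + input (idiomatic).

-- ===== PORT A =====
def has_decreasing (input : List Int) (maxV : Int) : Bool :=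
  match input with
  | [] => false
  | head :: tail =>
      if head < maxV then true
      else has_decreasing tail (max maxV head)

-- ===== PORT B =====
def has_decreasing_alt (input : List Int) (maxV : Int) : Bool :=
  let xs := maxV :: input
  (xs.zip xs.tail).any (fun p => p.2 < p.1)

-- ===== PRECONDITION & SPEC =====
def Spec_has_decreasing (input : List Int) (maxV : Int) (out : Bool) : Prop := out = has_decreasing_alt input maxV
instance (input : List Int) (maxV : Int) (out : Bool) : Decidable (Spec_has_decreasing input maxV out) := by unfold Spec_has_decreasing; infer_instance

-- ===== CLAIM (what is proved, stated in full; the proofs are below) =====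
def Claim_equal_has_decreasing : Prop := ∀ (input : List Int) (maxV : Int), Dom_has_decreasing input maxV → Spec_has_decreasing input maxV (has_decreasing input maxV)

-- ===== LEMMAS AND PROOFS =====
theorem alt_cons (h : Int) (t : List Int) (maxV : Int) :
    has_decreasing_alt (h :: t) maxV = (decide (h < maxV) || has_decreasing_alt t h) := by
  simp [has_decreasing_alt]

theorem a_eq_alt (input : List Int) (maxV : Int) :
    has_decreasing input maxV = has_decreasing_alt input maxV := by
  induction input generalizing maxV with
  | nil => simp [has_decreasing, has_decreasing_alt]
  | cons h t ih =>
      rw [alt_cons]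
      by_cases hc : h < maxV
      · simp [has_decreasing, hc]
      · have hm : max maxV h = h := by omega
        simp [has_decreasing, hc, hm, ih]

-- ===== VERDICT (by name: the statement is the Claim_ definition above) =====
theorem has_decreasing_spec : Claim_equal_has_decreasing := by
  intro input maxV _
  unfold Spec_has_decreasing
  exact a_eq_alt input maxV
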